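-- pv_equiv track=rewrite | github.com/Sondringsen/StoreDistribuerteOvinger | src/utils/data_utils.py | create_transportation_list
-- ===== SOURCE A (Python) =====
-- def create_transportation_list(transportation_list):
--     possible_transportation_modes = ["walk", "bike", "bus", "taxi", "car", "subway", "train", "airplane", "boat", "run", "motorcycle"]
--     binary_list = []
--
--     for possible_transportation in possible_transportation_modes:
--         if possible_transportation in transportation_list:
--             binary_list.append(1)
--         else:
--             binary_list.append(0)
--     return binary_list
-- ===== SOURCE B (Python) =====
-- def create_transportation_list(transportation_list):
--     possible_transportation_modes = ["walk", "bike", "bus", "taxi", "car", "subway", "train", "airplane", "boat", "run", "motorcycle"]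
--     binary_list = [0] * len(possible_transportation_modes)
--     for item in transportation_list:
--         if item in possible_transportation_modes:
--             binary_list[possible_transportation_modes.index(item)] = 1
--     return binary_list
-- ===== Notes on version B (the rewrite author's own statement) =====
-- stated objective: alternative
-- what changed: B pre-allocates the 11-slot output and makes one pass over the input, setting the slot of each recognised mode, instead of A's per-mode membership scan over the input.
import Mathlib
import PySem

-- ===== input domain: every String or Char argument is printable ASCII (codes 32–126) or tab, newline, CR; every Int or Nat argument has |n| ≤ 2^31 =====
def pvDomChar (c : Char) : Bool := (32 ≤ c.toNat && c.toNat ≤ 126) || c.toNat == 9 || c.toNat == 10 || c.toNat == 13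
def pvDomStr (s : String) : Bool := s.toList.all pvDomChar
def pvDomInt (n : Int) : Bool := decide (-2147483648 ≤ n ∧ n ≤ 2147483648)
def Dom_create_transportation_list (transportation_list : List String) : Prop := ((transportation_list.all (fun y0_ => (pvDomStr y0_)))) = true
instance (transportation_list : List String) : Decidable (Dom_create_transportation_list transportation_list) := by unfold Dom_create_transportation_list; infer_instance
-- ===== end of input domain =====

-- B pre-allocates the 11-slot output and makes one pass over the input, setting the slot of each
-- recognised mode, instead of A's per-mode membership scan over the input (alternative decomposition, same cost).

-- ===== PORT A =====
def pvModes : List String :=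
  ["walk", "bike", "bus", "taxi", "car", "subway", "train", "airplane", "boat", "run", "motorcycle"]

-- for possible in modes: binary_list.append(1 if possible in transportation_list else 0)
def create_transportation_list (transportation_list : List String) : List Int :=
  pvModes.foldl (fun binary_list possible =>
    if possible ∈ transportation_list then binary_list ++ [1] else binary_list ++ [0]) []

-- ===== PORT B =====
-- Source B loop body: 'if item in modes: binary_list[modes.index(item)] = 1';
-- PySem.List.index? is some exactly when the membership test succeeds, so the guard+index pair is one match.
def pvStepB (binary_list : List Int) (item : String) : List Int :=
  match PySem.List.index? pvModes item with
  | some i => binary_list.set i 1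
  | none => binary_list

def create_transportation_list_alt (transportation_list : List String) : List Int :=
  transportation_list.foldl pvStepB (List.replicate pvModes.length 0)

-- ===== PRECONDITION & SPEC =====
def Spec_create_transportation_list (transportation_list : List String) (out : List Int) : Prop := out = create_transportation_list_alt transportation_list
instance (transportation_list : List String) (out : List Int) : Decidable (Spec_create_transportation_list transportation_list out) := by unfold Spec_create_transportation_list; infer_instance

-- ===== CLAIM (what is proved, stated in full; the proofs are below) =====
def Claim_equal_create_transportation_list : Prop := ∀ (transportation_list : List String), Dom_create_transportation_list transportation_list → Spec_create_transportation_list transportation_list (create_transportation_list transportation_list)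

-- ===== LEMMAS AND PROOFS =====

lemma pvStepB_length (acc : List Int) (x : String) : (pvStepB acc x).length = acc.length := by
  unfold pvStepB
  cases PySem.List.index? pvModes x <;> simp

lemma pvFoldl_length (tl : List String) (acc : List Int) :
    (tl.foldl pvStepB acc).length = acc.length := by
  induction tl generalizing acc with
  | nil => rfl
  | cons x tl ih => simpa [pvStepB_length] using ih (pvStepB acc x)

lemma pvModes_nodup : pvModes.Nodup := by decide

lemma pvFoldl_getElem? (tl : List String) (acc : List Int) (h : acc.length = 11)
    (j : Nat) (hj : j < 11) :
    (tl.foldl pvStepB acc)[j]? =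
      if pvModes[j]'hj ∈ tl then some 1 else acc[j]? := by
  induction tl generalizing acc with
  | nil => simp
  | cons x tl ih =>
    have hlen : (pvStepB acc x).length = 11 := by rw [pvStepB_length]; exact h
    rw [List.foldl_cons, ih (pvStepB acc x) hlen]
    by_cases hm : pvModes[j]'hj ∈ tl
    · simp [hm]
    · simp only [hm, if_false, List.mem_cons, or_false]
      unfold pvStepB
      rcases hidx : PySem.List.index? pvModes x with _ | i
      · have hx : x ∉ pvModes := (PySem.List.index?_eq_none_iff _ _).1 hidx
        have hne : ¬ pvModes[j]'hj = x := by
          intro he; exact hx (he ▸ List.getElem_mem _)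
        simp [hne]
      · obtain ⟨hi, hix, _⟩ := PySem.List.getElem_of_index?_eq_some hidx
        rw [List.getElem?_set]
        by_cases hij : i = j
        · have hx : pvModes[j]'hj = x := by subst hij; exact hix
          rw [if_pos hx, if_pos hij, if_pos (show i < acc.length by omega)]
        · have hne : ¬ pvModes[j]'hj = x := by
            intro he
            exact hij (pvModes_nodup.getElem_inj_iff.1 (hix.trans he.symm))
          rw [if_neg hne, if_neg hij]

lemma pvA_eq_map (tl : List String) :
    create_transportation_list tl =
      pvModes.map (fun possible => if possible ∈ tl then (1 : Int) else 0) := by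
  unfold create_transportation_list
  have hfe : (fun (binary_list : List Int) possible =>
      if possible ∈ tl then binary_list ++ [1] else binary_list ++ [0]) =
      (fun binary_list possible => binary_list ++ [if possible ∈ tl then (1 : Int) else 0]) := by
    funext bl p
    by_cases hm : p ∈ tl <;> simp [hm]
  rw [hfe]
  simpa using PySem.List.foldl_append_singleton_eq_map (f := fun possible => if possible ∈ tl then (1 : Int) else 0) (l := pvModes) (acc := [])

-- ===== VERDICT (by name: the statement is the Claim_ definition above) =====
theorem create_transportation_list_spec : Claim_equal_create_transportation_list := by
  intro tl _
  unfold Spec_create_transportation_list create_transportation_list_alt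
  rw [pvA_eq_map]
  apply List.ext_getElem?
  intro j
  by_cases hj : j < 11
  · rw [pvFoldl_getElem? tl _ (by rfl) j hj]
    have hjr : (List.replicate pvModes.length (0 : Int))[j]? = some 0 :=
      List.getElem?_eq_getElem (l := List.replicate pvModes.length (0 : Int)) (by simpa using hj) ▸ by simp
    rw [hjr, List.getElem?_map, List.getElem?_eq_getElem (l := pvModes) hj]
    by_cases hm : pvModes[j]'hj ∈ tl <;> simp [hm]
  · rw [List.getElem?_eq_none (by simpa using Nat.le_of_not_lt hj),
        List.getElem?_eq_none (by rw [pvFoldl_length]; simpa using Nat.le_of_not_lt hj)]
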